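-- pv_equiv track=rewrite | github.com/div-bhati/Crop-Production-Analysis | Crop_Unified_Mentor.py | crop_category
-- ===== SOURCE A (Python) =====
-- def crop_category(crop):
--     for i in ['Rice', 'Maize', 'Bajra', 'Jowar', 'Korra', 'Ragi', 'Barley', 'Other Cereals & Millets', 'Small millets', 'Wheat', 'Jobster', 'Paddy', 'Total foodgrain', 'Samai']:
--         if crop ==i:
--             return "Cereal"
--     for i in ['Other Kharif pulses', 'Moong(Green Gram)', 'Urad', 'Arhar/Tur', 'Horse-gram', 'Gram', 'Masoor', 'other misc. pulses', 'Other Rabi pulses', 'Blackgram', 'Peas & beans (Pulses)', 'Cowpea(Lobia)', 'Peas (vegetable)', 'Beans & Mutter(Vegetable)', 'Khesari', 'Guar seed', 'Moth', 'Rajmash Kholar', 'Lentil', 'Pulses total', 'Ricebean (nagadal)', 'Peas & beans (Pulses)']: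
--         if crop == i:
--             return "Pulses"
--     for i in ['Groundnut', 'Sunflower', 'Castor seed', 'Sesamum', 'Linseed', 'Safflower', 'Rapeseed &Mustard', 'Niger seed', 'Soyabean', 'Oilseeds total', 'other oilseeds']:
--         if crop == i:
--             return "Oil Seeds"
--     for i in ['Banana', 'Mango', 'Orange', 'Pome Granet', 'Grapes', 'Lemon', 'Sapota', 'Papaya', 'Pome Fruit', 'Citrus Fruit', 'Other Fresh Fruits', 'Water Melon', 'Pineapple', 'Apple', 'Peach', 'Pear', 'Plums', 'Litchi', 'Ber', 'Jack Fruit', 'Other Citrus Fruit', 'Other Dry Fruit']: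
--         if crop == i:
--             return "Fruits"
--     for i in ['Sweet potato', 'Tapioca', 'Potato', 'Onion', 'Cabbage', 'Bottle Gourd', 'Brinjal', 'Bhindi', 'Tomato', 'Cucumber', 'Cauliflower', 'Bitter Gourd', 'Drum Stick', 'Snak Guard', 'Ribed Guard', 'Ash Gourd', 'Beet Root', 'Turnip', 'Carrot', 'Redish', 'Colocosia', 'Lab-Lab', 'Yam', 'Pump Kin', 'Other Vegetables']:
--         if crop == i:
--             return "Vegetables"
--     for i in ['Black pepper', 'Dry chillies', 'Turmeric', 'Dry ginger', 'Ginger', 'Coriander', 'Garlic', 'Cardamom', 'Cond-spcs other']: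
--         if crop == i:
--             return "Spices"
--     for i in ['Arecanut', 'Cashewnut', 'Coconut ', 'Rubber', 'Tea', 'Coffee']:
--         if crop == i:
--             return "Plantation Crops"
--     for i in ['Cotton(lint)', 'Kapas', 'Jute', 'Mesta', 'Jute & mesta', 'Other fibres', 'Sannhamp']:
--         if crop == i:
--             return "Fiber Crop"
--     for i in ['Arecanut (Processed)', 'Atcanut (Raw)', 'Cashewnut Processed', 'Cashewnut Raw', 'Arcanut (Processed)', 'Perilla']:
--         if crop == i:
--             return "Others"
-- ===== SOURCE B (Python) =====
-- _CATEGORIES = {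
--     'Cereal': ['Rice', 'Maize', 'Bajra', 'Jowar', 'Korra', 'Ragi', 'Barley', 'Other Cereals & Millets', 'Small millets', 'Wheat', 'Jobster', 'Paddy', 'Total foodgrain', 'Samai'],
--     'Pulses': ['Other Kharif pulses', 'Moong(Green Gram)', 'Urad', 'Arhar/Tur', 'Horse-gram', 'Gram', 'Masoor', 'other misc. pulses', 'Other Rabi pulses', 'Blackgram', 'Peas & beans (Pulses)', 'Cowpea(Lobia)', 'Peas (vegetable)', 'Beans & Mutter(Vegetable)', 'Khesari', 'Guar seed', 'Moth', 'Rajmash Kholar', 'Lentil', 'Pulses total', 'Ricebean (nagadal)'],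
--     'Oil Seeds': ['Groundnut', 'Sunflower', 'Castor seed', 'Sesamum', 'Linseed', 'Safflower', 'Rapeseed &Mustard', 'Niger seed', 'Soyabean', 'Oilseeds total', 'other oilseeds'],
--     'Fruits': ['Banana', 'Mango', 'Orange', 'Pome Granet', 'Grapes', 'Lemon', 'Sapota', 'Papaya', 'Pome Fruit', 'Citrus Fruit', 'Other Fresh Fruits', 'Water Melon', 'Pineapple', 'Apple', 'Peach', 'Pear', 'Plums', 'Litchi', 'Ber', 'Jack Fruit', 'Other Citrus Fruit', 'Other Dry Fruit'],
--     'Vegetables': ['Sweet potato', 'Tapioca', 'Potato', 'Onion', 'Cabbage', 'Bottle Gourd', 'Brinjal', 'Bhindi', 'Tomato', 'Cucumber', 'Cauliflower', 'Bitter Gourd', 'Drum Stick', 'Snak Guard', 'Ribed Guard', 'Ash Gourd', 'Beet Root', 'Turnip', 'Carrot', 'Redish', 'Colocosia', 'Lab-Lab', 'Yam', 'Pump Kin', 'Other Vegetables'],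
--     'Spices': ['Black pepper', 'Dry chillies', 'Turmeric', 'Dry ginger', 'Ginger', 'Coriander', 'Garlic', 'Cardamom', 'Cond-spcs other'],
--     'Plantation Crops': ['Arecanut', 'Cashewnut', 'Coconut ', 'Rubber', 'Tea', 'Coffee'],
--     'Fiber Crop': ['Cotton(lint)', 'Kapas', 'Jute', 'Mesta', 'Jute & mesta', 'Other fibres', 'Sannhamp'],
--     'Others': ['Arecanut (Processed)', 'Atcanut (Raw)', 'Cashewnut Processed', 'Cashewnut Raw', 'Arcanut (Processed)', 'Perilla'],
-- }
--
-- _MAPPING = {crop: cat for cat, crops in _CATEGORIES.items() for crop in crops}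
--
--
-- def crop_category(crop):
--     return _MAPPING.get(crop)
-- ===== Notes on version B (the rewrite author's own statement) =====
-- stated objective: idiomatic
-- what changed: Replaced A's nine sequential membership-scan loops with one crop-to-category dict built once from a {category: [crops]} table, so the body is a single mapping.get(crop) (first-listed category wins, matching A's scan order).
import Mathlib
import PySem

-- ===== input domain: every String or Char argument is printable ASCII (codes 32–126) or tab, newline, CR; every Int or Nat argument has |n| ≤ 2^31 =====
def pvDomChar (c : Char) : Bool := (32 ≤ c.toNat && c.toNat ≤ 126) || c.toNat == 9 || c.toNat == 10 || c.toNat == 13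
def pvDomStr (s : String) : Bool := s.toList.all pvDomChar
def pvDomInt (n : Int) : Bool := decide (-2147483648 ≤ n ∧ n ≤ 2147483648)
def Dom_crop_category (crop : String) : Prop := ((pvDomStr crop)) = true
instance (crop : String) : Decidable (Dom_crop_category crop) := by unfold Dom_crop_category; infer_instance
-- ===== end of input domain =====

-- B replaces A's nine sequential membership-scan loops with one precomputed crop→category dict and a single lookup (idiomatic rewrite; same return values).


-- ===== PORT A =====
def pyLoopEq (crop : String) : List String → Bool
  | [] => false
  | x :: xs => if crop == x then true else pyLoopEq crop xs

def crop_category (crop : String) : Option String :=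
  if pyLoopEq crop ["Rice", "Maize", "Bajra", "Jowar", "Korra", "Ragi", "Barley", "Other Cereals & Millets", "Small millets", "Wheat", "Jobster", "Paddy", "Total foodgrain", "Samai"] then some "Cereal"
  else
  if pyLoopEq crop ["Other Kharif pulses", "Moong(Green Gram)", "Urad", "Arhar/Tur", "Horse-gram", "Gram", "Masoor", "other misc. pulses", "Other Rabi pulses", "Blackgram", "Peas & beans (Pulses)", "Cowpea(Lobia)", "Peas (vegetable)", "Beans & Mutter(Vegetable)", "Khesari", "Guar seed", "Moth", "Rajmash Kholar", "Lentil", "Pulses total", "Ricebean (nagadal)", "Peas & beans (Pulses)"] then some "Pulses"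
  else
  if pyLoopEq crop ["Groundnut", "Sunflower", "Castor seed", "Sesamum", "Linseed", "Safflower", "Rapeseed &Mustard", "Niger seed", "Soyabean", "Oilseeds total", "other oilseeds"] then some "Oil Seeds"
  else
  if pyLoopEq crop ["Banana", "Mango", "Orange", "Pome Granet", "Grapes", "Lemon", "Sapota", "Papaya", "Pome Fruit", "Citrus Fruit", "Other Fresh Fruits", "Water Melon", "Pineapple", "Apple", "Peach", "Pear", "Plums", "Litchi", "Ber", "Jack Fruit", "Other Citrus Fruit", "Other Dry Fruit"] then some "Fruits"
  else
  if pyLoopEq crop ["Sweet potato", "Tapioca", "Potato", "Onion", "Cabbage", "Bottle Gourd", "Brinjal", "Bhindi", "Tomato", "Cucumber", "Cauliflower", "Bitter Gourd", "Drum Stick", "Snak Guard", "Ribed Guard", "Ash Gourd", "Beet Root", "Turnip", "Carrot", "Redish", "Colocosia", "Lab-Lab", "Yam", "Pump Kin", "Other Vegetables"] then some "Vegetables"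
  else
  if pyLoopEq crop ["Black pepper", "Dry chillies", "Turmeric", "Dry ginger", "Ginger", "Coriander", "Garlic", "Cardamom", "Cond-spcs other"] then some "Spices"
  else
  if pyLoopEq crop ["Arecanut", "Cashewnut", "Coconut ", "Rubber", "Tea", "Coffee"] then some "Plantation Crops"
  else
  if pyLoopEq crop ["Cotton(lint)", "Kapas", "Jute", "Mesta", "Jute & mesta", "Other fibres", "Sannhamp"] then some "Fiber Crop"
  else
  if pyLoopEq crop ["Arecanut (Processed)", "Atcanut (Raw)", "Cashewnut Processed", "Cashewnut Raw", "Arcanut (Processed)", "Perilla"] then some "Others"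
  else none

-- ===== PORT B =====
def bCategories : List (String × List String) :=
  [("Cereal", ["Rice", "Maize", "Bajra", "Jowar", "Korra", "Ragi", "Barley", "Other Cereals & Millets", "Small millets", "Wheat", "Jobster", "Paddy", "Total foodgrain", "Samai"]),
   ("Pulses", ["Other Kharif pulses", "Moong(Green Gram)", "Urad", "Arhar/Tur", "Horse-gram", "Gram", "Masoor", "other misc. pulses", "Other Rabi pulses", "Blackgram", "Peas & beans (Pulses)", "Cowpea(Lobia)", "Peas (vegetable)", "Beans & Mutter(Vegetable)", "Khesari", "Guar seed", "Moth", "Rajmash Kholar", "Lentil", "Pulses total", "Ricebean (nagadal)"]),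
   ("Oil Seeds", ["Groundnut", "Sunflower", "Castor seed", "Sesamum", "Linseed", "Safflower", "Rapeseed &Mustard", "Niger seed", "Soyabean", "Oilseeds total", "other oilseeds"]),
   ("Fruits", ["Banana", "Mango", "Orange", "Pome Granet", "Grapes", "Lemon", "Sapota", "Papaya", "Pome Fruit", "Citrus Fruit", "Other Fresh Fruits", "Water Melon", "Pineapple", "Apple", "Peach", "Pear", "Plums", "Litchi", "Ber", "Jack Fruit", "Other Citrus Fruit", "Other Dry Fruit"]),
   ("Vegetables", ["Sweet potato", "Tapioca", "Potato", "Onion", "Cabbage", "Bottle Gourd", "Brinjal", "Bhindi", "Tomato", "Cucumber", "Cauliflower", "Bitter Gourd", "Drum Stick", "Snak Guard", "Ribed Guard", "Ash Gourd", "Beet Root", "Turnip", "Carrot", "Redish", "Colocosia", "Lab-Lab", "Yam", "Pump Kin", "Other Vegetables"]),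
   ("Spices", ["Black pepper", "Dry chillies", "Turmeric", "Dry ginger", "Ginger", "Coriander", "Garlic", "Cardamom", "Cond-spcs other"]),
   ("Plantation Crops", ["Arecanut", "Cashewnut", "Coconut ", "Rubber", "Tea", "Coffee"]),
   ("Fiber Crop", ["Cotton(lint)", "Kapas", "Jute", "Mesta", "Jute & mesta", "Other fibres", "Sannhamp"]),
   ("Others", ["Arecanut (Processed)", "Atcanut (Raw)", "Cashewnut Processed", "Cashewnut Raw", "Arcanut (Processed)", "Perilla"])]

-- dict comprehension: fold of inserts over the flattened (crop, category) pairs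
def bMapping : PySem.Dict String String :=
  bCategories.foldl (fun d p => p.2.foldl (fun d c => d.insert c p.1) d) PySem.Dict.empty

def crop_category_alt (crop : String) : Option String :=
  bMapping.get? crop

-- ===== PRECONDITION & SPEC =====
def Spec_crop_category (crop : String) (out : Option String) : Prop := out = crop_category_alt crop
instance (crop : String) (out : Option String) : Decidable (Spec_crop_category crop out) := by unfold Spec_crop_category; infer_instance

-- ===== CLAIM (what is proved, stated in full; the proofs are below) =====
def Claim_equal_crop_category : Prop := ∀ (crop : String), Dom_crop_category crop → Spec_crop_category crop (crop_category crop)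

-- ===== LEMMAS AND PROOFS =====

set_option maxRecDepth 4000 in
-- the built dict, evaluated: all keys are distinct, so the inserts just append the blocks in order
theorem bMapping_eq : bMapping = PySem.Dict.mk
  (List.map (fun c => (c, "Cereal")) ["Rice", "Maize", "Bajra", "Jowar", "Korra", "Ragi", "Barley", "Other Cereals & Millets", "Small millets", "Wheat", "Jobster", "Paddy", "Total foodgrain", "Samai"] ++ (List.map (fun c => (c, "Pulses")) ["Other Kharif pulses", "Moong(Green Gram)", "Urad", "Arhar/Tur", "Horse-gram", "Gram", "Masoor", "other misc. pulses", "Other Rabi pulses", "Blackgram", "Peas & beans (Pulses)", "Cowpea(Lobia)", "Peas (vegetable)", "Beans & Mutter(Vegetable)", "Khesari", "Guar seed", "Moth", "Rajmash Kholar", "Lentil", "Pulses total", "Ricebean (nagadal)"] ++ (List.map (fun c => (c, "Oil Seeds")) ["Groundnut", "Sunflower", "Castor seed", "Sesamum", "Linseed", "Safflower", "Rapeseed &Mustard", "Niger seed", "Soyabean", "Oilseeds total", "other oilseeds"] ++ (List.map (fun c => (c, "Fruits")) ["Banana", "Mango", "Orange", "Pome Granet", "Grapes", "Lemon", "Sapota",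 "Papaya", "Pome Fruit", "Citrus Fruit", "Other Fresh Fruits", "Water Melon", "Pineapple", "Apple", "Peach", "Pear", "Plums", "Litchi", "Ber", "Jack Fruit", "Other Citrus Fruit", "Other Dry Fruit"] ++ (List.map (fun c => (c, "Vegetables")) ["Sweet potato", "Tapioca", "Potato", "Onion", "Cabbage", "Bottle Gourd", "Brinjal", "Bhindi", "Tomato", "Cucumber", "Cauliflower", "Bitter Gourd", "Drum Stick", "Snak Guard", "Ribed Guard", "Ash Gourd", "Beet Root", "Turnip", "Carrot", "Redish", "Colocosia", "Lab-Lab", "Yam", "Pump Kin", "Other Vegetables"] ++ (List.map (fun c => (c, "Spices")) ["Black pepper", "Dry chillies", "Turmeric", "Dry ginger", "Ginger", "Coriander", "Garlic", "Cardamom", "Cond-spcs other"] ++ (List.map (fun c => (c, "Plantation Crops")) ["Arecanut", "Cashewnut", "Coconut ", "Rubber", "Tea", "Coffee"] ++ (List.map (fun c => (c, "Fiber Crop")) ["Cotton(lint)", "Kapas", "Jute", "Mesta", "Jute & mesta", "Other fibres", "Sannhamp"] ++ (List.map (fun c => (c, "Others")) ["Arecanut (Processed)", "Atcanut (Raw)",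 "Cashewnut Processed", "Cashewnut Raw", "Arcanut (Processed)", "Perilla"] ++ []))))))))) := by decide

-- scanning one category block of the association list = A's membership loop over that block
theorem block_get? (crop cat : String) (l : List String) (rest : List (String × String)) :
    (PySem.Dict.mk (List.map (fun c => (c, cat)) l ++ rest)).get? crop
      = if pyLoopEq crop l then some cat else (PySem.Dict.mk rest).get? crop := by
  induction l with
  | nil => simp [pyLoopEq]
  | cons x xs ih =>
    by_cases h : x = crop
    · simp [pyLoopEq, PySem.Dict.get?_mk_cons, h]
    · have h' : crop ≠ x := fun hc => h hc.symm
      simp [pyLoopEq, PySem.Dict.get?_mk_cons, h, h', ih]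

-- A's pulses list repeats 'Peas & beans (Pulses)'; membership is unaffected
theorem pulses_loop_eq (crop : String) :
    pyLoopEq crop ["Other Kharif pulses", "Moong(Green Gram)", "Urad", "Arhar/Tur", "Horse-gram", "Gram", "Masoor", "other misc. pulses", "Other Rabi pulses", "Blackgram", "Peas & beans (Pulses)", "Cowpea(Lobia)", "Peas (vegetable)", "Beans & Mutter(Vegetable)", "Khesari", "Guar seed", "Moth", "Rajmash Kholar", "Lentil", "Pulses total", "Ricebean (nagadal)", "Peas & beans (Pulses)"]
      = pyLoopEq crop ["Other Kharif pulses", "Moong(Green Gram)", "Urad", "Arhar/Tur", "Horse-gram", "Gram", "Masoor", "other misc. pulses", "Other Rabi pulses", "Blackgram", "Peas & beans (Pulses)", "Cowpea(Lobia)", "Peas (vegetable)", "Beans & Mutter(Vegetable)", "Khesari", "Guar seed", "Moth", "Rajmash Kholar", "Lentil", "Pulses total", "Ricebean (nagadal)"] := by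
  by_cases h : crop = "Peas & beans (Pulses)" <;> simp [pyLoopEq, h]

-- ===== VERDICT (by name: the statement is the Claim_ definition above) =====
theorem crop_category_spec : Claim_equal_crop_category := by
  intro crop _
  unfold Spec_crop_category crop_category crop_category_alt
  rw [bMapping_eq, block_get?, block_get?, block_get?, block_get?, block_get?, block_get?,
      block_get?, block_get?, block_get?, pulses_loop_eq]
  rfl
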